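-- pv_equiv track=rewrite | github.com/jimorie/advent-of-code | 2023/day15.py | process
-- ===== SOURCE A (Python) =====
-- def hashit(s: str) -> int:
--     """Return the HASH value of `str`."""
--     v: int = 0
--     for c in s:
--         v += ord(c)
--         v *= 17
--         v %= 256
--     return v
--
-- def process(steps: list[str]) -> list[dict[str, int]]:
--     """
--     Process all `steps` and return the resulting list of boxes with
--     lenses.
--     """
--     boxes = [{} for _ in range(256)]
--     for step in steps:
--         if step.endswith("-"):
--             label = step.removesuffix("-")
--             boxes[hashit(label)].pop(label, None)
--         else:
--             label, value = step.split("=")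
--             boxes[hashit(label)][label] = int(value)
--     return boxes
-- ===== SOURCE B (Python) =====
-- def hashit(s: str) -> int:
--     """Return the HASH value of `str`."""
--     v = 0
--     for c in s:
--         v = (v + ord(c)) * 17 % 256
--     return v
--
-- def process(steps: list[str]) -> list[dict[str, int]]:
--     """
--     Process all `steps` and return the resulting list of boxes with
--     lenses.  Offline instead of simulated: a lens survives iff its label
--     has an '=' step after the label's last '-' step; its value is the
--     last such '=' value, and its position is set by the first such '='
--     step (the moment it entered its box).  Labels are sorted by that
--     entry index and inserted into fresh boxes once.
--     """
--     parsed = []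
--     for step in steps:
--         if step.endswith("-"):
--             parsed.append((step[:-1], None))
--         else:
--             label, value = step.split("=")
--             parsed.append((label, int(value)))
--     last_del = {}
--     for i, (label, val) in enumerate(parsed):
--         if val is None:
--             last_del[label] = i
--     slot = {}
--     value = {}
--     for i, (label, val) in enumerate(parsed):
--         if val is not None and i > last_del.get(label, -1):
--             if label not in slot:
--                 slot[label] = i
--             value[label] = val
--     boxes = [{} for _ in range(256)]
--     for label in sorted(slot, key=slot.get):
--         boxes[hashit(label)][label] = value[label]
--     return boxes
-- ===== Notes on version B (the rewrite author's own statement) =====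
-- stated objective: alternative
-- what changed: B never simulates the boxes: it computes each label's fate offline (last '-' index, then first and last '=' after it) in two passes over the parsed steps, sorts the surviving labels by their entry index, and fills fresh boxes once, instead of A's step-by-step mutation of 256 dicts.
import Mathlib
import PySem

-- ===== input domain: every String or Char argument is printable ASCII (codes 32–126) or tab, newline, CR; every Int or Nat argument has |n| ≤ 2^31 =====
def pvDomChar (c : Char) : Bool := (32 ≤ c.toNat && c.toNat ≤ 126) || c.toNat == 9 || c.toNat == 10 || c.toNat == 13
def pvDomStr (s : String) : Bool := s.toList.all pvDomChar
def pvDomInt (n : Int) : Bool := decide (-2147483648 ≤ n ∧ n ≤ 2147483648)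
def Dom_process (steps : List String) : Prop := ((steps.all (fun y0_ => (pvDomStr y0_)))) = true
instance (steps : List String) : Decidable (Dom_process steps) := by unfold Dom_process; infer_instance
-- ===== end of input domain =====

-- B replaces A's step-by-step simulation of 256 dict boxes by an offline analysis:
-- two passes compute each label's last '-' index and then its first/last '=' after it,
-- the surviving labels are sorted by entry index and fresh boxes are filled once.
-- Same return value; no argument is mutated by either version.

-- ===== PORT A =====

-- hashit: v = ((v + ord c) * 17) % 256 over the characters (identical helper in A and B)
def hashit (s : String) : Int :=
  s.toList.foldl (fun v c => PySem.Int.mod ((v + (c.toNat : Int)) * 17) 256) 0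

-- the body of A's `for step in steps` loop (boxes are dicts)
def processStepA (boxes : List (PySem.Dict String Int)) (step : String) :
    List (PySem.Dict String Int) :=
  if PySem.Str.endswith step "-" then
    -- step.removesuffix("-") equals step[:-1] under the endswith guard
    let label := PySem.Str.slice step none (some (-1))
    -- boxes[hashit(label)].pop(label, None): the value is discarded, so erase is exact
    PySem.List.pySetD boxes (hashit label)
      ((PySem.List.pyGetD boxes (hashit label) PySem.Dict.empty).erase label)
  else
    -- label, value = step.split("="): Pre_ guarantees exactly two parts
    let parts := (PySem.Str.split? step "=").getD []   -- sep "=" ≠ "", so split? is always some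
    let label := parts.getD 0 ""
    let value := (PySem.Int.ofStr? (parts.getD 1 "")).getD 0  -- int(value): Pre_ guarantees isSome
    PySem.List.pySetD boxes (hashit label)
      ((PySem.List.pyGetD boxes (hashit label) PySem.Dict.empty).insert label value)

def process (steps : List String) : List (List (String × Int)) :=
  (steps.foldl processStepA
    ((PySem.List.pyRange 0 256 1).map (fun _ => PySem.Dict.empty))).map PySem.Dict.items

-- ===== PORT B =====

-- the body of Source B's parse loop: a step becomes (label, None) or (label, int(value))
def parseStep (step : String) : String × Option Int :=
  if PySem.Str.endswith step "-" then
    (PySem.Str.slice step none (some (-1)), none)   -- step[:-1]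
  else
    let parts := (PySem.Str.split? step "=").getD []   -- sep "=" ≠ "", so split? is always some
    (parts.getD 0 "", some ((PySem.Int.ofStr? (parts.getD 1 "")).getD 0))  -- Pre_: isSome

def parseB (steps : List String) : List (String × Option Int) :=
  steps.foldl (fun acc step => acc ++ [parseStep step]) []

-- last_del[label] = i for every delete step, in order
def lastDelStep (d : PySem.Dict String Int) (p : Int × (String × Option Int)) :
    PySem.Dict String Int :=
  match p.2.2 with
  | none => d.insert p.2.1 p.1
  | some _ => d

def lastDel (parsed : List (String × Option Int)) : PySem.Dict String Int :=
  (PySem.List.enumerate parsed).foldl lastDelStep PySem.Dict.empty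

-- one iteration of Source B's slot/value loop
def slotValStep (ld : PySem.Dict String Int)
    (sv : PySem.Dict String Int × PySem.Dict String Int)
    (p : Int × (String × Option Int)) : PySem.Dict String Int × PySem.Dict String Int :=
  match p.2.2 with
  | some v =>
      if ld.getD p.2.1 (-1) < p.1 then
        ((if sv.1.contains p.2.1 then sv.1 else sv.1.insert p.2.1 p.1),
          sv.2.insert p.2.1 v)
      else sv
  | none => sv

def slotVal (ld : PySem.Dict String Int) (parsed : List (String × Option Int)) :
    PySem.Dict String Int × PySem.Dict String Int :=
  (PySem.List.enumerate parsed).foldl (slotValStep ld) (PySem.Dict.empty, PySem.Dict.empty)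

def process_alt (steps : List String) : List (List (String × Int)) :=
  let parsed := parseB steps
  let sv := slotVal (lastDel parsed) parsed
  -- sorted(slot, key=slot.get): every key of slot maps to some value, so .get = .getD _ 0
  let order := PySem.List.sorted sv.1.keys (fun l => sv.1.getD l 0) false
  -- value[label]: every key of slot is also a key of value, so KeyError is unreachable
  ((order.foldl (fun bs l =>
      PySem.List.pySetD bs (hashit l)
        ((PySem.List.pyGetD bs (hashit l) PySem.Dict.empty).insert l (sv.2.getD l 0)))
    ((PySem.List.pyRange 0 256 1).map (fun _ => PySem.Dict.empty)))).map PySem.Dict.items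

-- ===== PRECONDITION & SPEC =====

-- Pre_ excludes exactly the inputs on which Python A raises (it never returns there):
-- a step that neither ends in "-" nor splits on "=" into exactly two parts raises
-- ValueError from tuple unpacking, and a non-int()-parseable value part raises
-- ValueError from int(); B raises in the same way on those inputs.
def Pre_process (steps : List String) : Prop :=
  ∀ step ∈ steps, PySem.Str.endswith step "-" = true ∨
    (((PySem.Str.split? step "=").getD []).length = 2 ∧
      (PySem.Int.ofStr? (((PySem.Str.split? step "=").getD []).getD 1 "")).isSome = true)
instance (steps : List String) : Decidable (Pre_process steps) := by
  unfold Pre_process; infer_instance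

def pvWitness_process : List String := ["rn=1", "cm-", "qp=3", "cm=2", "rn-"]

def Spec_process (steps : List String) (out : List (List (String × Int))) : Prop :=
  out = process_alt steps
instance (steps : List String) (out : List (List (String × Int))) :
    Decidable (Spec_process steps out) := by unfold Spec_process; infer_instance

-- ===== CLAIM (what is proved, stated in full; the proofs are below) =====
def Claim_equal_process : Prop :=
  ∀ (steps : List String), Dom_process steps → Pre_process steps →
    Spec_process steps (process steps)

-- ===== LEMMAS AND PROOFS =====

-- Specification-level model: a single global pair list evolved step by step
-- (delete first match / overwrite in place or append), plus pointwise per-label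
-- folds mirroring Source B's offline analysis.

def delFirst : List (String × Int) → String → List (String × Int)
  | [], _ => []
  | p :: rest, label => if p.1 = label then rest else p :: delFirst rest label

def setPair : List (String × Int) → String → Int → List (String × Int)
  | [], label, value => [(label, value)]
  | p :: rest, label, value =>
      if p.1 = label then (p.1, value) :: rest else p :: setPair rest label value

def stepQ (Q : List (String × Int)) (p : String × Option Int) : List (String × Int) :=
  match p.2 with
  | none => delFirst Q p.1
  | some v => setPair Q p.1 v

def QF (parsed : List (String × Option Int)) : List (String × Int) :=
  parsed.foldl stepQ []

-- pointwise (per-label) form of one slot/value iteration, state (inSlot, slot, value)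
def pw (l : String) (t : Int) (st : Bool × Int × Int) (p : Int × (String × Option Int)) :
    Bool × Int × Int :=
  match p.2.2 with
  | some v => if p.2.1 = l ∧ t < p.1 then (true, (if st.1 then st.2.1 else p.1), v) else st
  | none => st

def TD (parsed : List (String × Option Int)) (l : String) : Int :=
  (lastDel parsed).getD l (-1)

def F (parsed : List (String × Option Int)) (l : String) : Bool × Int × Int :=
  (PySem.List.enumerate parsed).foldl (pw l (TD parsed l)) (false, 0, 0)

-- ---------- basic facts ----------

lemma foldl_hash_bounds (l : List Char) (v : Int) (h0 : 0 ≤ v) (h1 : v < 256) :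
    0 ≤ l.foldl (fun v c => PySem.Int.mod ((v + (c.toNat : Int)) * 17) 256) v ∧
      l.foldl (fun v c => PySem.Int.mod ((v + (c.toNat : Int)) * 17) 256) v < 256 := by
  induction l generalizing v with
  | nil => exact ⟨h0, h1⟩
  | cons c rest ih =>
      exact ih _ (PySem.Int.mod_nonneg _ (by norm_num)) (PySem.Int.mod_lt _ (by norm_num))

lemma hashit_bounds (s : String) : 0 ≤ hashit s ∧ hashit s < 256 :=
  foldl_hash_bounds s.toList 0 (by norm_num) (by norm_num)

lemma parseB_eq_map (steps : List String) : parseB steps = steps.map parseStep := by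
  unfold parseB
  rw [PySem.List.foldl_append_singleton_eq_map parseStep steps []]
  rfl


-- ---------- delFirst / setPair ----------

lemma delFirst_eq_filter (Q : List (String × Int)) (k : String)
    (h : (Q.map Prod.fst).Nodup) :
    delFirst Q k = Q.filter (fun p => !(p.1 == k)) := by
  induction Q with
  | nil => rfl
  | cons p rest ih =>
      simp only [List.map_cons, List.nodup_cons] at h
      by_cases hp : p.1 = k
      · subst hp
        rw [delFirst, if_pos rfl, List.filter_cons, if_neg (by simp)]
        refine (List.filter_eq_self.mpr ?_).symm
        intro q hq
        have : q.1 ≠ p.1 := fun e => h.1 (e ▸ List.mem_map_of_mem hq)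
        simpa using this
      · rw [delFirst, if_neg hp, List.filter_cons, if_pos (by simpa using hp), ih h.2]


lemma setPair_of_not_mem (Q : List (String × Int)) (k : String) (v : Int)
    (h : k ∉ Q.map Prod.fst) : setPair Q k v = Q ++ [(k, v)] := by
  induction Q with
  | nil => rfl
  | cons p rest ih =>
      simp only [List.map_cons, List.mem_cons, not_or] at h
      rw [setPair, if_neg (fun e => h.1 e.symm), List.cons_append, ih h.2]


lemma map_fst_setPair_of_mem (Q : List (String × Int)) (k : String) (v : Int)
    (h : k ∈ Q.map Prod.fst) : (setPair Q k v).map Prod.fst = Q.map Prod.fst := by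
  induction Q with
  | nil => simp at h
  | cons p rest ih =>
      by_cases hp : p.1 = k
      · rw [setPair, if_pos hp]; simp
      · rw [setPair, if_neg hp]
        simp only [List.map_cons, List.mem_cons] at h ⊢
        rcases h with h | h
        · exact absurd h.symm hp
        · rw [ih h]


lemma mem_setPair (Q : List (String × Int)) (k : String) (v : Int)
    (hnd : (Q.map Prod.fst).Nodup) (p : String × Int) (hp : p ∈ setPair Q k v) :
    p = (k, v) ∨ (p ∈ Q ∧ p.1 ≠ k) := by
  induction Q with
  | nil => simpa [setPair] using hp
  | cons q rest ih =>
      simp only [List.map_cons, List.nodup_cons] at hnd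
      by_cases hq : q.1 = k
      · subst hq
        rw [setPair, if_pos rfl] at hp
        rcases List.mem_cons.mp hp with h | h
        · exact Or.inl h
        · refine Or.inr ⟨List.mem_cons_of_mem _ h, fun e => hnd.1 ?_⟩
          exact e ▸ List.mem_map_of_mem h
      · rw [setPair, if_neg hq] at hp
        rcases List.mem_cons.mp hp with h | h
        · exact Or.inr ⟨h ▸ List.mem_cons_self .., h ▸ hq⟩
        · rcases ih hnd.2 h with h' | h'
          · exact Or.inl h'
          · exact Or.inr ⟨List.mem_cons_of_mem _ h'.1, h'.2⟩


lemma filter_fst_setPair_neg (pred : String → Bool) (Q : List (String × Int))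
    (k : String) (v : Int) (h : pred k = false) :
    (setPair Q k v).filter (fun p => pred p.1) = Q.filter (fun p => pred p.1) := by
  induction Q with
  | nil => simp [setPair, h]
  | cons q rest ih =>
      by_cases hq : q.1 = k <;> simp [setPair, hq, h, List.filter_cons, ih]


lemma filter_fst_setPair_pos (pred : String → Bool) (Q : List (String × Int))
    (k : String) (v : Int) (h : pred k = true) :
    (setPair Q k v).filter (fun p => pred p.1) =
      setPair (Q.filter (fun p => pred p.1)) k v := by
  induction Q with
  | nil => simp [setPair, h]
  | cons q rest ih =>
      by_cases hq : q.1 = k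
      · simp [setPair, hq, h]
      · by_cases hp : pred q.1 <;> simp [setPair, hq, hp, ih]


lemma filter_fst_delFirst_neg (pred : String → Bool) (Q : List (String × Int))
    (k : String) (h : pred k = false) :
    (delFirst Q k).filter (fun p => pred p.1) = Q.filter (fun p => pred p.1) := by
  induction Q with
  | nil => rfl
  | cons q rest ih =>
      by_cases hq : q.1 = k <;> simp [delFirst, hq, h, List.filter_cons, ih]


lemma filter_fst_delFirst_pos (pred : String → Bool) (Q : List (String × Int))
    (k : String) (h : pred k = true) :
    (delFirst Q k).filter (fun p => pred p.1) =
      delFirst (Q.filter (fun p => pred p.1)) k := by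
  induction Q with
  | nil => rfl
  | cons q rest ih =>
      by_cases hq : q.1 = k
      · simp [delFirst, hq, h]
      · by_cases hp : pred q.1 <;> simp [delFirst, hq, hp, ih]


lemma delFirst_sublist (Q : List (String × Int)) (k : String) :
    List.Sublist (delFirst Q k) Q := by
  induction Q with
  | nil => exact List.Sublist.refl _
  | cons q rest ih =>
      rw [delFirst]
      split
      · exact List.sublist_cons_self q rest
      · exact ih.cons₂ q

lemma nodup_fst_stepQ (Q : List (String × Int)) (p : String × Option Int)
    (h : (Q.map Prod.fst).Nodup) : ((stepQ Q p).map Prod.fst).Nodup := by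
  match p with
  | (k, none) => exact (((delFirst_sublist Q k)).map Prod.fst).nodup h
  | (k, some v) =>
      show ((setPair Q k v).map Prod.fst).Nodup
      by_cases hm : k ∈ Q.map Prod.fst
      · rw [map_fst_setPair_of_mem Q k v hm]; exact h
      · rw [setPair_of_not_mem Q k v hm]
        simp only [List.map_append, List.map_cons, List.map_nil, List.nodup_append,
          List.nodup_singleton]
        refine ⟨h, trivial, fun a ha b hb => ?_⟩
        rw [List.mem_singleton.mp hb]
        exact fun e => hm (e ▸ ha)

lemma map_overwrite_eq_self (rest : List (String × Int)) (k : String) (v : Int)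
    (hk : k ∉ rest.map Prod.fst) :
    rest.map (fun p => if p.1 == k then (k, v) else p) = rest := by
  conv_rhs => rw [show rest = rest.map id from (List.map_id rest).symm]
  apply List.map_congr_left
  intro q hq
  have : q.1 ≠ k := fun e => hk (e ▸ List.mem_map_of_mem hq)
  simp [this]

-- items of a pair list with distinct labels behave like dict insert/erase
lemma setPair_eq_items_insert (l : List (String × Int)) (k : String) (v : Int)
    (h : (l.map Prod.fst).Nodup) :
    setPair l k v = ((PySem.Dict.mk l).insert k v).items := by
  induction l with
  | nil => simp [setPair, PySem.Dict.insert, PySem.Dict.contains]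
  | cons p rest ih =>
      simp only [List.map_cons, List.nodup_cons] at h
      simp only [PySem.Dict.insert, PySem.Dict.contains] at *
      by_cases hp : p.1 = k
      · subst hp
        rw [setPair, if_pos rfl]
        rw [if_pos (by simp)]
        simp only [List.map_cons, if_pos (beq_self_eq_true p.1)]
        rw [map_overwrite_eq_self rest p.1 v (by simpa using h.1)]
      · rw [setPair, if_neg hp]
        rw [ih h.2]
        by_cases hc : (rest.any fun q => q.1 == k) = true
        · simp [List.any_cons, hc, hp]
        · simp [List.any_cons, hc, hp]

lemma erase_items (d : PySem.Dict String Int) (k : String) :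
    (d.erase k).items = d.items.filter (fun p => !(p.1 == k)) := rfl

-- ---------- the box invariant and its step lemmas ----------

def InvBox (dA : List (PySem.Dict String Int)) (Q : List (String × Int)) : Prop :=
  dA.length = 256 ∧ ∀ i : Nat, i < 256 →
    (dA.getD i PySem.Dict.empty).items = Q.filter (fun p => hashit p.1 == (i : Int))

lemma inv_fill (dA : List (PySem.Dict String Int)) (Q : List (String × Int))
    (l : String) (v : Int) (hinv : InvBox dA Q) (hnd : (Q.map Prod.fst).Nodup) :
    InvBox
      (PySem.List.pySetD dA (hashit l)
        ((PySem.List.pyGetD dA (hashit l) PySem.Dict.empty).insert l v))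
      (setPair Q l v) := by
  obtain ⟨hlen, hitems⟩ := hinv
  obtain ⟨h0, h1⟩ := hashit_bounds l
  have hlt : (hashit l).toNat < 256 := by omega
  have hbound : (hashit l).toNat < dA.length := by omega
  have hget : PySem.List.pyGetD dA (hashit l) PySem.Dict.empty = dA[(hashit l).toNat] :=
    PySem.List.pyGetD_eq_getElem dA PySem.Dict.empty h0 (by rw [hlen]; exact_mod_cast h1)
  constructor
  · rw [PySem.List.pySetD_of_nonneg _ _ h0, List.length_set, hlen]
  · intro i hi
    rw [PySem.List.pySetD_of_nonneg _ _ h0]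
    by_cases hih : i = (hashit l).toNat
    · subst hih
      rw [List.getD_eq_getElem?_getD, List.getElem?_set_self hbound, Option.getD_some]
      rw [hget, ← List.getD_eq_getElem dA PySem.Dict.empty hbound]
      have hpred : (fun s => hashit s == (((hashit l).toNat : Nat) : Int)) l = true := by
        simp only [beq_iff_eq]
        omega
      rw [filter_fst_setPair_pos (fun s => hashit s == (((hashit l).toNat : Nat) : Int)) Q l v hpred, ← hitems _ hlt]
      have hnd' : (((dA.getD (hashit l).toNat PySem.Dict.empty).items).map Prod.fst).Nodup := by
        rw [hitems _ hlt]
        exact ((List.filter_sublist).map Prod.fst).nodup hnd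
      rw [setPair_eq_items_insert _ l v hnd']
    · rw [List.getD_eq_getElem?_getD, List.getElem?_set_ne (fun e => hih e.symm),
        ← List.getD_eq_getElem?_getD, hitems i hi]
      have hpred : (fun s => hashit s == ((i : Nat) : Int)) l = false := by
        simp only [beq_eq_false_iff_ne, ne_eq]
        intro e
        apply hih
        omega
      rw [filter_fst_setPair_neg (fun s => hashit s == ((i : Nat) : Int)) Q l v hpred]

lemma inv_del (dA : List (PySem.Dict String Int)) (Q : List (String × Int))
    (l : String) (hinv : InvBox dA Q) (hnd : (Q.map Prod.fst).Nodup) :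
    InvBox
      (PySem.List.pySetD dA (hashit l)
        ((PySem.List.pyGetD dA (hashit l) PySem.Dict.empty).erase l))
      (delFirst Q l) := by
  obtain ⟨hlen, hitems⟩ := hinv
  obtain ⟨h0, h1⟩ := hashit_bounds l
  have hlt : (hashit l).toNat < 256 := by omega
  have hbound : (hashit l).toNat < dA.length := by omega
  have hget : PySem.List.pyGetD dA (hashit l) PySem.Dict.empty = dA[(hashit l).toNat] :=
    PySem.List.pyGetD_eq_getElem dA PySem.Dict.empty h0 (by rw [hlen]; exact_mod_cast h1)
  constructor
  · rw [PySem.List.pySetD_of_nonneg _ _ h0, List.length_set, hlen]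
  · intro i hi
    rw [PySem.List.pySetD_of_nonneg _ _ h0]
    by_cases hih : i = (hashit l).toNat
    · subst hih
      rw [List.getD_eq_getElem?_getD, List.getElem?_set_self hbound, Option.getD_some]
      rw [hget, ← List.getD_eq_getElem dA PySem.Dict.empty hbound]
      have hpred : (fun s => hashit s == (((hashit l).toNat : Nat) : Int)) l = true := by
        simp only [beq_iff_eq]
        omega
      have hndf : ((Q.filter (fun p => hashit p.1 == (((hashit l).toNat : Nat) : Int))).map
          Prod.fst).Nodup := ((List.filter_sublist).map Prod.fst).nodup hnd
      rw [filter_fst_delFirst_pos (fun s => hashit s == (((hashit l).toNat : Nat) : Int)) Q l hpred, delFirst_eq_filter _ l hndf, ← hitems _ hlt,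
        erase_items]
    · rw [List.getD_eq_getElem?_getD, List.getElem?_set_ne (fun e => hih e.symm),
        ← List.getD_eq_getElem?_getD, hitems i hi]
      have hpred : (fun s => hashit s == ((i : Nat) : Int)) l = false := by
        simp only [beq_eq_false_iff_ne, ne_eq]
        intro e
        apply hih
        omega
      rw [filter_fst_delFirst_neg (fun s => hashit s == ((i : Nat) : Int)) Q l hpred]

lemma inv_init : InvBox ((PySem.List.pyRange 0 256 1).map (fun _ => PySem.Dict.empty)) [] := by
  have h256 : (((256 : Int) - 0).toNat) = 256 := rfl
  constructor
  · rw [List.length_map, PySem.List.length_pyRange_one, h256]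
  · intro i hi
    have hl : i < ((PySem.List.pyRange 0 256 1).map
        (fun _ => (PySem.Dict.empty : PySem.Dict String Int))).length := by
      rw [List.length_map, PySem.List.length_pyRange_one, h256]
      omega
    rw [List.getD_eq_getElem _ _ hl]
    simp only [List.getElem_map]
    rfl

lemma A_fold (steps : List String) (dA : List (PySem.Dict String Int))
    (Q : List (String × Int)) (hinv : InvBox dA Q) (hnd : (Q.map Prod.fst).Nodup) :
    InvBox (steps.foldl processStepA dA) ((steps.map parseStep).foldl stepQ Q) ∧
      ((((steps.map parseStep).foldl stepQ Q).map Prod.fst).Nodup) := by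
  induction steps generalizing dA Q with
  | nil => exact ⟨hinv, hnd⟩
  | cons s rest ih =>
      simp only [List.foldl_cons, List.map_cons]
      have hstep : InvBox (processStepA dA s) (stepQ Q (parseStep s)) := by
        unfold processStepA parseStep
        by_cases hw : PySem.Str.endswith s "-" = true
        · rw [if_pos hw, if_pos hw]
          exact inv_del dA Q _ ⟨hinv.1, hinv.2⟩ hnd
        · rw [if_neg hw, if_neg hw]
          exact inv_fill dA Q _ _ ⟨hinv.1, hinv.2⟩ hnd
      exact ih _ _ hstep (nodup_fst_stepQ Q (parseStep s) hnd)

lemma B_fold (ls : List String) (g : String → Int) (bs : List (PySem.Dict String Int))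
    (Q : List (String × Int)) (hinv : InvBox bs Q) (hnd : (Q.map Prod.fst).Nodup) :
    InvBox
      (ls.foldl (fun bs l =>
        PySem.List.pySetD bs (hashit l)
          ((PySem.List.pyGetD bs (hashit l) PySem.Dict.empty).insert l (g l))) bs)
      (ls.foldl (fun Q l => setPair Q l (g l)) Q) ∧
      (((ls.foldl (fun Q l => setPair Q l (g l)) Q).map Prod.fst).Nodup) := by
  induction ls generalizing bs Q with
  | nil => exact ⟨hinv, hnd⟩
  | cons l rest ih =>
      simp only [List.foldl_cons]
      exact ih _ _ (inv_fill bs Q l (g l) hinv hnd)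
        (nodup_fst_stepQ Q (l, some (g l)) hnd)

lemma foldl_setPair_fresh (g : String → Int) (ls : List String)
    (acc : List (String × Int)) (hnd : ls.Nodup)
    (hdisj : ∀ l ∈ ls, l ∉ acc.map Prod.fst) :
    ls.foldl (fun Q l => setPair Q l (g l)) acc = acc ++ ls.map (fun l => (l, g l)) := by
  induction ls generalizing acc with
  | nil => simp
  | cons l rest ih =>
      simp only [List.foldl_cons, List.map_cons]
      obtain ⟨hl, hrest⟩ := List.nodup_cons.mp hnd
      rw [setPair_of_not_mem _ _ _ (hdisj l (List.mem_cons_self ..))]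
      rw [ih (acc ++ [(l, g l)]) hrest ?_]
      · simp
      · intro l' hl'
        simp only [List.map_append, List.map_cons, List.map_nil, List.mem_append,
          List.mem_singleton, not_or]
        exact ⟨hdisj l' (List.mem_cons_of_mem _ hl'), fun e => hl (e ▸ hl')⟩

-- ---------- lastDel / F recurrences ----------

lemma TD_append (ps : List (String × Option Int)) (p : String × Option Int) (l : String) :
    TD (ps ++ [p]) l = if p.1 = l ∧ p.2 = none then ((ps.length : Int)) else TD ps l := by
  unfold TD lastDel
  rw [PySem.List.enumerate_append, List.foldl_append]
  rcases p with ⟨k, ov⟩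
  cases ov with
  | none =>
      simp only [PySem.List.enumerate_cons, PySem.List.enumerate_nil, List.foldl_cons,
        List.foldl_nil, lastDelStep, PySem.Dict.getD_insert]
      by_cases hl : k = l
      · subst hl
        simp
      · rw [if_neg (fun e => hl e.symm), if_neg (by rintro ⟨e, -⟩; exact hl e)]
  | some v =>
      simp only [PySem.List.enumerate_cons, PySem.List.enumerate_nil, List.foldl_cons,
        List.foldl_nil, lastDelStep]
      simp

lemma TD_bounds (ps : List (String × Option Int)) (l : String) :
    -1 ≤ TD ps l ∧ TD ps l < (ps.length : Int) := by
  have gen : ∀ (e : List (Int × (String × Option Int))) (d : PySem.Dict String Int),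
      (∀ q ∈ e, -1 ≤ q.1 ∧ q.1 < (ps.length : Int)) →
      -1 ≤ d.getD l (-1) ∧ d.getD l (-1) < (ps.length : Int) →
      -1 ≤ (e.foldl lastDelStep d).getD l (-1) ∧
        (e.foldl lastDelStep d).getD l (-1) < (ps.length : Int) := by
    intro e
    induction e with
    | nil => exact fun d _ hd => hd
    | cons q rest ih =>
        intro d he hd
        rw [List.foldl_cons]
        refine ih _ (fun q' hq' => he q' (List.mem_cons_of_mem _ hq')) ?_
        rcases q with ⟨i, k, ov⟩
        cases ov with
        | some v => exact hd
        | none =>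
            simp only [lastDelStep, PySem.Dict.getD_insert]
            by_cases hl : l = k
            · simp only [hl, if_true]
              exact he _ (List.mem_cons_self ..)
            · simpa [hl] using hd
  refine gen _ _ ?_ ?_
  · intro q hq
    rcases (PySem.List.mem_enumerate_iff _ _ _).mp hq with ⟨k, hk, rfl⟩
    constructor <;> omega
  · rw [PySem.Dict.getD_empty]
    constructor
    · exact le_refl _
    · have : (0 : Int) ≤ (ps.length : Int) := by positivity
      omega

lemma pw_fold_id (l : String) (t : Int) (e : List (Int × (String × Option Int)))
    (st : Bool × Int × Int) (h : ∀ q ∈ e, ¬ t < q.1) :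
    e.foldl (pw l t) st = st := by
  induction e generalizing st with
  | nil => rfl
  | cons q rest ih =>
      rw [List.foldl_cons]
      have hq : pw l t st q = st := by
        rcases q with ⟨i, k, ov⟩
        cases ov with
        | none => rfl
        | some v =>
            simp only [pw]
            rw [if_neg]
            rintro ⟨-, hlt⟩
            exact h (i, k, some v) (List.mem_cons_self ..) hlt
      rw [hq]
      exact ih _ (fun q hq => h q (List.mem_cons_of_mem _ hq))

lemma F_append_del_self (ps : List (String × Option Int)) (l : String) :
    F (ps ++ [(l, none)]) l = (false, 0, 0) := by
  have h1 : (PySem.List.enumerate ps 0).foldl (pw l ((ps.length : Int))) (false, 0, 0) =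
      ((false : Bool), (0 : Int), (0 : Int)) := by
    apply pw_fold_id
    intro q hq
    rcases (PySem.List.mem_enumerate_iff _ _ _).mp hq with ⟨k, hk, rfl⟩
    simp only [zero_add]
    omega
  unfold F
  rw [TD_append, if_pos ⟨rfl, rfl⟩]
  rw [PySem.List.enumerate_append, List.foldl_append, h1]
  simp [PySem.List.enumerate_cons, PySem.List.enumerate_nil, pw]

lemma F_append_del_other (ps : List (String × Option Int)) (l l' : String)
    (h : l' ≠ l) : F (ps ++ [(l, none)]) l' = F ps l' := by
  unfold F
  rw [TD_append, if_neg (by rintro ⟨e, -⟩; exact h e.symm)]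
  rw [PySem.List.enumerate_append, List.foldl_append]
  simp [PySem.List.enumerate_cons, PySem.List.enumerate_nil, pw]

lemma F_append_set_other (ps : List (String × Option Int)) (l l' : String) (v : Int)
    (h : l' ≠ l) : F (ps ++ [(l, some v)]) l' = F ps l' := by
  unfold F
  rw [TD_append, if_neg (by rintro ⟨-, e⟩; simp at e)]
  rw [PySem.List.enumerate_append, List.foldl_append]
  simp only [PySem.List.enumerate_cons, PySem.List.enumerate_nil, List.foldl_cons,
    List.foldl_nil, pw]
  rw [if_neg (by rintro ⟨e, -⟩; exact h e.symm)]

lemma F_append_set_self (ps : List (String × Option Int)) (l : String) (v : Int) :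
    F (ps ++ [(l, some v)]) l =
      (true, (if (F ps l).1 then (F ps l).2.1 else (ps.length : Int)), v) := by
  unfold F
  rw [TD_append, if_neg (by rintro ⟨-, e⟩; simp at e)]
  rw [PySem.List.enumerate_append, List.foldl_append]
  simp only [PySem.List.enumerate_cons, PySem.List.enumerate_nil, List.foldl_cons,
    List.foldl_nil, pw]
  rw [if_pos ⟨by trivial, by have := (TD_bounds ps l).2; omega⟩]
  simp

-- ---------- the crux: QF is exactly what the offline analysis describes ----------

lemma crux (parsed : List (String × Option Int)) :
    (((QF parsed).map Prod.fst).Nodup) ∧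
    (∀ l, l ∈ (QF parsed).map Prod.fst ↔ (F parsed l).1 = true) ∧
    (∀ p ∈ QF parsed, (F parsed p.1).2.2 = p.2) ∧
    (((QF parsed).map Prod.fst).Pairwise (fun a b => (F parsed a).2.1 < (F parsed b).2.1)) ∧
    (∀ p ∈ QF parsed, 0 ≤ (F parsed p.1).2.1 ∧ (F parsed p.1).2.1 < (parsed.length : Int)) := by
  induction parsed using List.reverseRecOn with
  | nil => simp [QF, F]
  | append_singleton ps p ih =>
      obtain ⟨ha, hb, hc, hd, he⟩ := ih
      have hQ : QF (ps ++ [p]) = stepQ (QF ps) p := by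
        unfold QF
        rw [List.foldl_append, List.foldl_cons, List.foldl_nil]
      have hlen : ((ps ++ [p]).length : Int) = (ps.length : Int) + 1 := by
        simp
      have hA : (((QF (ps ++ [p])).map Prod.fst).Nodup) := by
        rw [hQ]; exact nodup_fst_stepQ _ _ ha
      rcases p with ⟨l, ov⟩
      cases ov with
      | none =>
          have hQ' : QF (ps ++ [(l, none)]) = (QF ps).filter (fun q => !(q.1 == l)) := by
            rw [hQ]
            exact delFirst_eq_filter _ _ ha
          have hFo : ∀ l', l' ≠ l → F (ps ++ [(l, none)]) l' = F ps l' :=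
            fun l' h => F_append_del_other ps l l' h
          have hFs : F (ps ++ [(l, none)]) l = (false, 0, 0) := F_append_del_self ps l
          have hmem : ∀ q ∈ QF (ps ++ [(l, none)]), q ∈ QF ps ∧ q.1 ≠ l := by
            intro q hq
            rw [hQ'] at hq
            obtain ⟨h1, h2⟩ := List.mem_filter.mp hq
            simp only [Bool.not_eq_eq_eq_not, Bool.not_true, beq_eq_false_iff_ne, ne_eq] at h2
            exact ⟨h1, h2⟩
          refine ⟨hA, ?_, ?_, ?_, ?_⟩
          · intro l'
            by_cases hl' : l' = l
            · subst hl'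
              rw [hFs]
              simp only [Bool.false_eq_true, iff_false]
              intro hmm
              rcases List.mem_map.mp hmm with ⟨q, hq, rfl⟩
              exact (hmem q hq).2 rfl
            · rw [hFo l' hl', ← hb l']
              constructor
              · intro hmm
                rcases List.mem_map.mp hmm with ⟨q, hq, rfl⟩
                exact List.mem_map_of_mem (hmem q hq).1
              · intro hmm
                rcases List.mem_map.mp hmm with ⟨q, hq, rfl⟩
                refine List.mem_map_of_mem ?_
                rw [hQ']
                refine List.mem_filter.mpr ⟨hq, by simpa using hl'⟩
          · intro q hq
            obtain ⟨h1, h2⟩ := hmem q hq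
            rw [hFo q.1 h2]
            exact hc q h1
          · have hsub : List.Sublist ((QF (ps ++ [(l, none)])).map Prod.fst)
                ((QF ps).map Prod.fst) := by
              rw [hQ']
              exact (List.filter_sublist).map Prod.fst
            refine (hd.sublist hsub).imp_of_mem ?_
            intro a b hma hmb hr
            have hal : a ≠ l := by
              rcases List.mem_map.mp hma with ⟨q, hq, rfl⟩
              exact (hmem q hq).2
            have hbl : b ≠ l := by
              rcases List.mem_map.mp hmb with ⟨q, hq, rfl⟩
              exact (hmem q hq).2
            rw [hFo a hal, hFo b hbl]
            exact hr
          · intro q hq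
            obtain ⟨h1, h2⟩ := hmem q hq
            rw [hFo q.1 h2, hlen]
            have := he q h1
            omega
      | some v =>
          have hFo : ∀ l', l' ≠ l → F (ps ++ [(l, some v)]) l' = F ps l' :=
            fun l' h => F_append_set_other ps l l' v h
          by_cases hm : l ∈ (QF ps).map Prod.fst
          · -- overwrite in place
            have hF1 : (F ps l).1 = true := (hb l).mp hm
            have hQ' : QF (ps ++ [(l, some v)]) = setPair (QF ps) l v := hQ
            have hmf : (QF (ps ++ [(l, some v)])).map Prod.fst = (QF ps).map Prod.fst := by
              rw [hQ']
              exact map_fst_setPair_of_mem _ _ _ hm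
            have hFs : F (ps ++ [(l, some v)]) l = (true, (F ps l).2.1, v) := by
              rw [F_append_set_self ps l v, hF1]
              simp
            have hslot : ∀ a, (F (ps ++ [(l, some v)]) a).2.1 = (F ps a).2.1 := by
              intro a
              by_cases hal : a = l
              · subst hal
                rw [hFs]
              · rw [hFo a hal]
            refine ⟨hA, ?_, ?_, ?_, ?_⟩
            · intro l'
              by_cases hl' : l' = l
              · subst hl'
                rw [hFs, hmf]
                simpa using hm
              · rw [hFo l' hl', hmf]
                exact hb l'
            · intro q hq
              rw [hQ'] at hq
              rcases mem_setPair _ _ _ ha q hq with h | ⟨h1, h2⟩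
              · rw [h, hFs]
              · rw [hFo q.1 h2]
                exact hc q h1
            · rw [hmf]
              refine hd.imp ?_
              intro a b hr
              rw [hslot a, hslot b]
              exact hr
            · intro q hq
              rw [hQ'] at hq
              rcases mem_setPair _ _ _ ha q hq with h | ⟨h1, h2⟩
              · rcases List.mem_map.mp hm with ⟨q0, hq0, he0⟩
                have := he q0 hq0
                rw [h, hFs, hlen]
                simp only []
                rw [← he0] at *
                omega
              · rw [hFo q.1 h2, hlen]
                have := he q h1
                omega
          · -- fresh label: appended at the end
            have hF1 : (F ps l).1 = false := by
              have : (F ps l).1 ≠ true := fun h => hm ((hb l).mpr h)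
              simpa using this
            have hQ' : QF (ps ++ [(l, some v)]) = QF ps ++ [(l, v)] := by
              rw [hQ]
              exact setPair_of_not_mem _ _ _ hm
            have hmf : (QF (ps ++ [(l, some v)])).map Prod.fst =
                (QF ps).map Prod.fst ++ [l] := by
              rw [hQ']
              simp
            have hFs : F (ps ++ [(l, some v)]) l = (true, (ps.length : Int), v) := by
              rw [F_append_set_self ps l v, hF1]
              simp
            have hne : ∀ a ∈ (QF ps).map Prod.fst, a ≠ l :=
              fun a hma e => hm (e ▸ hma)
            refine ⟨hA, ?_, ?_, ?_, ?_⟩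
            · intro l'
              rw [hmf]
              by_cases hl' : l' = l
              · subst hl'
                rw [hFs]
                simp
              · rw [hFo l' hl']
                simp only [List.mem_append, List.mem_singleton, hl', or_false]
                exact hb l'
            · intro q hq
              rw [hQ'] at hq
              rcases List.mem_append.mp hq with h | h
              · have hql : q.1 ≠ l := hne q.1 (List.mem_map_of_mem h)
                rw [hFo q.1 hql]
                exact hc q h
              · rw [List.mem_singleton.mp h, hFs]
            · rw [hmf]
              rw [List.pairwise_append]
              refine ⟨?_, by simp, ?_⟩
              · refine hd.imp_of_mem ?_
                intro a b hma hmb hr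
                rw [hFo a (hne a hma), hFo b (hne b hmb)]
                exact hr
              · intro a hma b hmb
                rw [List.mem_singleton.mp hmb, hFs, hFo a (hne a hma)]
                rcases List.mem_map.mp hma with ⟨q0, hq0, rfl⟩
                exact (he q0 hq0).2
            · intro q hq
              rw [hQ'] at hq
              rcases List.mem_append.mp hq with h | h
              · rw [hFo q.1 (hne q.1 (List.mem_map_of_mem h)), hlen]
                have := he q h
                omega
              · rw [List.mem_singleton.mp h, hFs, hlen]
                simp only []
                constructor
                · positivity
                · omega

-- ---------- bridging Source B's dicts to the pointwise folds ----------

lemma slotVal_pointwise (ld : PySem.Dict String Int)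
    (parsed : List (String × Option Int)) (l : String) :
    (((slotVal ld parsed).1.contains l), ((slotVal ld parsed).1.getD l 0),
        ((slotVal ld parsed).2.getD l 0)) =
      (PySem.List.enumerate parsed).foldl (pw l (ld.getD l (-1))) (false, 0, 0) := by
  have gen : ∀ (e : List (Int × (String × Option Int)))
      (sv : PySem.Dict String Int × PySem.Dict String Int),
      (((e.foldl (slotValStep ld) sv).1.contains l),
        ((e.foldl (slotValStep ld) sv).1.getD l 0),
        ((e.foldl (slotValStep ld) sv).2.getD l 0)) =
        e.foldl (pw l (ld.getD l (-1)))
          (sv.1.contains l, sv.1.getD l 0, sv.2.getD l 0) := by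
    intro e
    induction e with
    | nil => intro sv; rfl
    | cons q rest ih =>
        intro sv
        rw [List.foldl_cons, List.foldl_cons, ih (slotValStep ld sv q)]
        congr 1
        rcases q with ⟨i, k, ov⟩
        cases ov with
        | none => rfl
        | some v =>
            by_cases hk : k = l
            · subst hk
              by_cases hc : ld.getD k (-1) < i
              · by_cases hcont : sv.1.contains k = true
                · simp [slotValStep, pw, hc, hcont, PySem.Dict.getD_insert_self]
                · simp [slotValStep, pw, hc, hcont, PySem.Dict.getD_insert_self,
                    PySem.Dict.contains_insert_self]
              · simp [slotValStep, pw, hc]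
            · have hlk : ¬ l = k := fun e => hk e.symm
              by_cases hc : ld.getD k (-1) < i
              · by_cases hcont : sv.1.contains k = true
                · simp [slotValStep, pw, hc, hk, hcont, PySem.Dict.getD_insert, hlk]
                · simp [slotValStep, pw, hc, hk, hcont, PySem.Dict.getD_insert,
                    PySem.Dict.contains_insert, hlk]
              · simp [slotValStep, pw, hc, hk]
  unfold slotVal
  rw [gen]
  simp

lemma nodup_keys_slotVal (ld : PySem.Dict String Int)
    (parsed : List (String × Option Int)) : (slotVal ld parsed).1.keys.Nodup := by
  have gen : ∀ (e : List (Int × (String × Option Int)))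
      (sv : PySem.Dict String Int × PySem.Dict String Int),
      sv.1.keys.Nodup → (e.foldl (slotValStep ld) sv).1.keys.Nodup := by
    intro e
    induction e with
    | nil => exact fun sv h => h
    | cons q rest ih =>
        intro sv h
        rw [List.foldl_cons]
        refine ih _ ?_
        rcases q with ⟨i, k, ov⟩
        cases ov with
        | none => exact h
        | some v =>
            simp only [slotValStep]
            by_cases hc : ld.getD k (-1) < i
            · rw [if_pos hc]
              by_cases hcont : sv.1.contains k = true
              · simpa [hcont] using h
              · simp only [hcont, Bool.false_eq_true, if_false]
                exact PySem.Dict.nodup_keys_insert _ _ _ h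
            · rw [if_neg hc]
              exact h
  exact gen _ _ (by simp)

lemma order_eq (parsed : List (String × Option Int)) :
    PySem.List.sorted (slotVal (lastDel parsed) parsed).1.keys
        (fun l => (slotVal (lastDel parsed) parsed).1.getD l 0) false =
      (QF parsed).map Prod.fst := by
  have hbr : ∀ a, ((slotVal (lastDel parsed) parsed).1.contains a,
      (slotVal (lastDel parsed) parsed).1.getD a 0,
      (slotVal (lastDel parsed) parsed).2.getD a 0) = F parsed a :=
    fun a => slotVal_pointwise _ _ a
  have hcont : ∀ a, (slotVal (lastDel parsed) parsed).1.contains a = (F parsed a).1 :=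
    fun a => congrArg (fun t => t.1) (hbr a)
  have hslot : ∀ a, (slotVal (lastDel parsed) parsed).1.getD a 0 = (F parsed a).2.1 :=
    fun a => congrArg (fun t => t.2.1) (hbr a)
  obtain ⟨hnodup, hmemiff, -, hpair, -⟩ := crux parsed
  apply PySem.List.sorted_eq_of_perm_of_pairwise_lt
  · refine (List.perm_ext_iff_of_nodup hnodup (nodup_keys_slotVal _ _)).mpr ?_
    intro a
    rw [hmemiff a, ← PySem.Dict.contains_iff_mem_keys, hcont a]
  · refine hpair.imp ?_
    intro a b hr
    rw [hslot a, hslot b]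
    exact hr

lemma process_eq (steps : List String) : process steps = process_alt steps := by
  obtain ⟨hinvA, hndA⟩ := A_fold steps _ [] inv_init (by simp)
  obtain ⟨hnodup, hmemiff, hval, hpair, hbound⟩ := crux (steps.map parseStep)
  have hbr : ∀ a, ((slotVal (lastDel (steps.map parseStep)) (steps.map parseStep)).1.contains a,
      (slotVal (lastDel (steps.map parseStep)) (steps.map parseStep)).1.getD a 0,
      (slotVal (lastDel (steps.map parseStep)) (steps.map parseStep)).2.getD a 0) =
      F (steps.map parseStep) a :=
    fun a => slotVal_pointwise _ _ a
  obtain ⟨hinvB, -⟩ := B_fold ((QF (steps.map parseStep)).map Prod.fst)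
    (fun l => (slotVal (lastDel (steps.map parseStep)) (steps.map parseStep)).2.getD l 0)
    _ [] inv_init (by simp)
  have hfreshQ : ((QF (steps.map parseStep)).map Prod.fst).foldl
      (fun Q l => setPair Q l ((slotVal (lastDel (steps.map parseStep))
        (steps.map parseStep)).2.getD l 0)) [] = QF (steps.map parseStep) := by
    rw [foldl_setPair_fresh _ _ [] hnodup (by simp), List.nil_append, List.map_map]
    have hid : ∀ q ∈ QF (steps.map parseStep),
        ((fun l => (l, (slotVal (lastDel (steps.map parseStep))
          (steps.map parseStep)).2.getD l 0)) ∘ Prod.fst) q = q := by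
      intro q hq
      have h2 : (slotVal (lastDel (steps.map parseStep))
          (steps.map parseStep)).2.getD q.1 0 = q.2 := by
        have h3 := congrArg (fun t => t.2.2) (hbr q.1)
        simp only [] at h3
        rw [h3, hval q hq]
      rcases q with ⟨a, b⟩
      simp only [Function.comp]
      rw [h2]
    rw [List.map_congr_left hid, List.map_id']
  simp only [process, process_alt, parseB_eq_map]
  rw [order_eq (steps.map parseStep)]
  apply List.ext_getElem
  · rw [List.length_map, List.length_map, hinvA.1, hinvB.1]
  · intro i h1 h2
    have hiA : i < 256 := by rwa [List.length_map, hinvA.1] at h1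
    rw [List.getElem_map, List.getElem_map]
    rw [← List.getD_eq_getElem _ PySem.Dict.empty (by rwa [hinvA.1]),
        ← List.getD_eq_getElem _ PySem.Dict.empty (by rwa [hinvB.1])]
    rw [hinvA.2 i hiA, hinvB.2 i hiA, hfreshQ]
    rfl

-- ===== VERDICT (by name: the statement is the Claim_ definition above) =====
theorem process_spec : Claim_equal_process := by
  intro steps _ _
  unfold Spec_process
  exact process_eq steps
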